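-- pv_equiv track=rewrite | github.com/NKU-EmbeddedSystem/gadgets | modgadgets/calculate.py | calculate
-- ===== SOURCE A (Python) =====
-- def calculate(mod1, mod2, reg, rm):
--     i = 0
--     left = 0
--     res = []
--     while i < 0xff:
--         if i & 7 == reg or (i >> 3) & 7 == rm or (i >> 6) == mod1 or (i >> 6) == mod2:
--             if left <= i - 1:
--                 res.append((left, i - 1))
--             left = i + 1
--         i += 1
--
--     return res
-- ===== SOURCE B (Python) =====
-- def calculate(mod1, mod2, reg, rm):
--     # Generate the forbidden bytes directly (no per-byte predicate test):
--     # reg forbids the stride-8 progression reg, reg+8, ...; rm forbids 8-byte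
--     # blocks repeating every 64; each mod forbids one 64-byte quadrant.
--     forb = set()
--     if 0 <= reg < 8:
--         forb.update(range(reg, 0xff, 8))
--     if 0 <= rm < 8:
--         for b in range(8 * rm, 0xff, 64):
--             forb.update(range(b, min(b + 8, 0xff)))
--     for m in (mod1, mod2):
--         if 0 <= m < 4:
--             forb.update(range(64 * m, min(64 * m + 64, 0xff)))
--     # Emit the gap before each forbidden byte, tracking the end of the last one.
--     res = []
--     prev = 0
--     for f in sorted(forb):
--         if prev <= f - 1:
--             res.append((prev, f - 1))
--         prev = f + 1
--     return res
-- ===== Notes on version B (the rewrite author's own statement) =====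
-- stated objective: alternative
-- what changed: Instead of scanning all 255 bytes with the bit predicate and a stateful left/res loop, B generates the forbidden bytes directly as arithmetic progressions (stride-8 for reg, repeating 8-byte blocks for rm, one 64-byte quadrant per mod) collected into a set, sorts them, and emits the gap before each forbidden byte in one pass over only those bytes.
import Mathlib
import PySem

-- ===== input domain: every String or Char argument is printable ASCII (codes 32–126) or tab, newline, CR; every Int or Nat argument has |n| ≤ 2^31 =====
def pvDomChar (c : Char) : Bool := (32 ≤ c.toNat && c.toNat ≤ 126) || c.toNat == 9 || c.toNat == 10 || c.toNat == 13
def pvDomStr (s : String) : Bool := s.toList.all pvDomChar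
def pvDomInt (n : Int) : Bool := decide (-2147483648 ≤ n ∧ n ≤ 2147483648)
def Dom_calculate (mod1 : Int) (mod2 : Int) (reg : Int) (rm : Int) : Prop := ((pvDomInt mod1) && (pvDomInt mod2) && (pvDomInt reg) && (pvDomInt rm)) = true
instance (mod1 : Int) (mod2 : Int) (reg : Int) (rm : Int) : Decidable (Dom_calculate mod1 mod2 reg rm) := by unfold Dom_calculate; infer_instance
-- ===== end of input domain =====

-- B generates the forbidden bytes directly as arithmetic progressions / blocks collected in a
-- set, instead of testing every byte 0..254 against the bit predicate (objective: alternative).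

-- ===== PORT A =====
-- body of A's while loop: state (left, res), i the loop counter
def pvStepA (reg rm mod1 mod2 : Int) (st : Int × List (Int × Int)) (i : Int) : Int × List (Int × Int) :=
  if (PySem.Int.band i 7 == reg) || (PySem.Int.band (i >>> (3:Nat)) 7 == rm)
      || ((i >>> (6:Nat)) == mod1) || ((i >>> (6:Nat)) == mod2) then
    (i + 1, if st.1 ≤ i - 1 then st.2 ++ [(st.1, i - 1)] else st.2)
  else st

def calculate (mod1 : Int) (mod2 : Int) (reg : Int) (rm : Int) : List (Int × Int) :=
  ((PySem.List.pyRange 0 255 1).foldl (pvStepA reg rm mod1 mod2) (0, [])).2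

-- ===== PORT B =====
-- the forbidden-byte set, generated from periodic patterns (Source B's first half,
-- the successive re-assignments of 'forb' as staged helpers)
def pvForb0 (reg : Int) : PySem.Set Int :=
  if 0 ≤ reg ∧ reg < 8 then PySem.Set.update PySem.Set.empty (PySem.List.pyRange reg 255 8)
  else PySem.Set.empty

def pvForb1 (reg rm : Int) : PySem.Set Int :=
  if 0 ≤ rm ∧ rm < 8 then
    (PySem.List.pyRange (8 * rm) 255 64).foldl
      (fun s b => PySem.Set.update s (PySem.List.pyRange b (min (b + 8) 255) 1)) (pvForb0 reg)
  else pvForb0 reg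

def pvForb (mod1 mod2 reg rm : Int) : PySem.Set Int :=
  [mod1, mod2].foldl
    (fun s m => if 0 ≤ m ∧ m < 4 then PySem.Set.update s (PySem.List.pyRange (64 * m) (min (64 * m + 64) 255) 1) else s)
    (pvForb1 reg rm)

-- body of Source B's gap loop: state (prev, res), f the current forbidden byte
def pvStepB (st : Int × List (Int × Int)) (f : Int) : Int × List (Int × Int) :=
  (f + 1, if st.1 ≤ f - 1 then st.2 ++ [(st.1, f - 1)] else st.2)

def calculate_alt (mod1 : Int) (mod2 : Int) (reg : Int) (rm : Int) : List (Int × Int) :=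
  ((PySem.List.sorted (pvForb mod1 mod2 reg rm) (fun x => x) false).foldl pvStepB (0, [])).2

-- ===== PRECONDITION & SPEC =====
def Spec_calculate (mod1 : Int) (mod2 : Int) (reg : Int) (rm : Int) (out : List (Int × Int)) : Prop := out = calculate_alt mod1 mod2 reg rm
instance (mod1 : Int) (mod2 : Int) (reg : Int) (rm : Int) (out : List (Int × Int)) : Decidable (Spec_calculate mod1 mod2 reg rm out) := by unfold Spec_calculate; infer_instance

-- ===== CLAIM (what is proved, stated in full; the proofs are below) =====
def Claim_equal_calculate : Prop := ∀ (mod1 : Int) (mod2 : Int) (reg : Int) (rm : Int), Dom_calculate mod1 mod2 reg rm → Spec_calculate mod1 mod2 reg rm (calculate mod1 mod2 reg rm)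

-- ===== LEMMAS AND PROOFS =====

-- A's loop condition as a predicate
def pvCond (mod1 mod2 reg rm : Int) (i : Int) : Bool :=
  (PySem.Int.band i 7 == reg) || (PySem.Int.band (i >>> (3:Nat)) 7 == rm)
    || ((i >>> (6:Nat)) == mod1) || ((i >>> (6:Nat)) == mod2)

-- A's fold only changes state on bytes satisfying the condition, so it equals the fold over the filtered list.
lemma foldA_filter (reg rm mod1 mod2 : Int) :
    ∀ (l : List Int) (st : Int × List (Int × Int)),
      l.foldl (pvStepA reg rm mod1 mod2) st
        = (l.filter (pvCond mod1 mod2 reg rm)).foldl (pvStepA reg rm mod1 mod2) st := by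
  intro l
  induction l with
  | nil => intro st; rfl
  | cons i t ih =>
      intro st
      by_cases h : pvCond mod1 mod2 reg rm i
      · simp [List.filter, h, List.foldl, ih]
      · have h' : pvCond mod1 mod2 reg rm i = false := by simpa using h
        have hA : pvStepA reg rm mod1 mod2 st i = st := by
          simp only [pvStepA]
          simp only [pvCond] at h'
          simp [h']
        simp [List.filter, h, List.foldl, hA, ih]

-- on bytes satisfying the condition, A's step is B's gap step
lemma stepA_eq_stepB (reg rm mod1 mod2 i : Int) (h : pvCond mod1 mod2 reg rm i = true)
    (st : Int × List (Int × Int)) : pvStepA reg rm mod1 mod2 st i = pvStepB st i := by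
  simp only [pvCond] at h
  simp [pvStepA, pvStepB, h]

-- membership in a fold of set-updates
lemma mem_foldl_update {β : Type} (g : β → List Int) :
    ∀ (l : List β) (s : PySem.Set Int) (x : Int),
      (x ∈ l.foldl (fun s b => PySem.Set.update s (g b)) s) ↔ x ∈ s ∨ ∃ b ∈ l, x ∈ g b := by
  intro l
  induction l with
  | nil => simp
  | cons b t ih =>
      intro s x
      simp only [List.foldl_cons, ih, PySem.Set.mem_update, List.mem_cons]
      constructor
      · rintro (( h | h) | ⟨c, hc, hx⟩)
        · exact Or.inl h
        · exact Or.inr ⟨b, Or.inl rfl, h⟩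
        · exact Or.inr ⟨c, Or.inr hc, hx⟩
      · rintro (h | ⟨c, (rfl | hc), hx⟩)
        · exact Or.inl (Or.inl h)
        · exact Or.inl (Or.inr hx)
        · exact Or.inr ⟨c, hc, hx⟩

-- nodup is preserved by a fold of set-updates
lemma nodup_foldl_update {β : Type} (g : β → List Int) :
    ∀ (l : List β) (s : PySem.Set Int), s.Nodup →
      (l.foldl (fun s b => PySem.Set.update s (g b)) s).Nodup := by
  intro l
  induction l with
  | nil => intro s hs; simpa using hs
  | cons b t ih =>
      intro s hs
      simpa using ih _ (PySem.Set.nodup_update _ _ hs)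

-- bit predicate ↔ arithmetic, for 0 ≤ i
lemma band7_eq (i : Int) (h : 0 ≤ i) : PySem.Int.band i 7 = i % 8 := by
  rw [PySem.Int.band_of_nonneg h (by norm_num)]
  have h2 : i.toNat &&& (7:Int).toNat = i.toNat % 8 := by
    have := Nat.and_two_pow_sub_one_eq_mod i.toNat 3
    norm_num at this ⊢
    exact this
  rw [h2]
  omega

lemma shr3_eq (i : Int) : i >>> (3:Nat) = i / 8 := by
  simp [Int.shiftRight_eq_div_pow]

lemma shr6_eq (i : Int) : i >>> (6:Nat) = i / 64 := by
  simp [Int.shiftRight_eq_div_pow]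

-- stage-wise membership characterizations
lemma mem_forb0 (reg x : Int) :
    x ∈ pvForb0 reg ↔ (0 ≤ reg ∧ reg < 8) ∧ (reg ≤ x ∧ x < 255 ∧ (8:Int) ∣ x - reg) := by
  unfold pvForb0
  split_ifs with h <;>
    simp [PySem.Set.mem_update, PySem.Set.empty, PySem.List.mem_pyRange_iff_of_pos (by norm_num : (0:Int) < 8), h]

lemma mem_forb1 (reg rm x : Int) :
    x ∈ pvForb1 reg rm ↔ x ∈ pvForb0 reg ∨
      ((0 ≤ rm ∧ rm < 8) ∧ ∃ b, (8 * rm ≤ b ∧ b < 255 ∧ (64:Int) ∣ b - 8 * rm) ∧ b ≤ x ∧ x < min (b + 8) 255) := by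
  unfold pvForb1
  split_ifs with h
  · rw [mem_foldl_update]
    simp [PySem.List.mem_pyRange_iff_of_pos (by norm_num : (0:Int) < 64), PySem.List.mem_pyRange_one, h,
      and_assoc]
  · simp [h]

lemma mem_forb (mod1 mod2 reg rm x : Int) :
    x ∈ pvForb mod1 mod2 reg rm ↔ x ∈ pvForb1 reg rm ∨
      ((0 ≤ mod1 ∧ mod1 < 4) ∧ 64 * mod1 ≤ x ∧ x < min (64 * mod1 + 64) 255) ∨
      ((0 ≤ mod2 ∧ mod2 < 4) ∧ 64 * mod2 ≤ x ∧ x < min (64 * mod2 + 64) 255) := by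
  unfold pvForb
  simp only [List.foldl_cons, List.foldl_nil]
  split_ifs with h1 h2 h2 <;>
    simp [PySem.Set.mem_update, PySem.List.mem_pyRange_one, h1, h2] <;> tauto

-- the generated forbidden set has exactly the bytes 0..254 satisfying A's condition
lemma mem_forb_iff (mod1 mod2 reg rm x : Int) :
    x ∈ pvForb mod1 mod2 reg rm ↔ (0 ≤ x ∧ x < 255) ∧ pvCond mod1 mod2 reg rm x = true := by
  rw [mem_forb, mem_forb1, mem_forb0]
  by_cases hx : 0 ≤ x ∧ x < 255
  · have hd8 : (0:Int) ≤ x / 8 := Int.ediv_nonneg hx.1 (by norm_num)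
    simp only [pvCond, Bool.or_eq_true, beq_iff_eq, shr3_eq, shr6_eq,
      band7_eq x hx.1, band7_eq (x / 8) hd8]
    constructor
    · rintro ((⟨hr, hm⟩ | ⟨hr, b, hb, hbx⟩) | h | h) <;> exact ⟨hx, by omega⟩
    · rintro ⟨-, (((h | h) | h) | h)⟩
      · exact Or.inl (Or.inl (by omega))
      · exact Or.inl (Or.inr ⟨by omega, x - x % 8, by omega, by omega⟩)
      · exact Or.inr (Or.inl (by omega))
      · exact Or.inr (Or.inr (by omega))
  · constructor
    · rintro ((⟨hr, hm⟩ | ⟨hr, b, hb, hbx⟩) | h | h) <;> exact absurd (by omega : 0 ≤ x ∧ x < 255) hx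
    · rintro ⟨h, -⟩; exact absurd h hx

lemma nodup_forb (mod1 mod2 reg rm : Int) : (pvForb mod1 mod2 reg rm).Nodup := by
  have h0 : (pvForb0 reg).Nodup := by
    unfold pvForb0
    split_ifs <;> first
      | exact PySem.Set.nodup_update _ _ List.nodup_nil
      | exact List.nodup_nil
  have h1 : (pvForb1 reg rm).Nodup := by
    unfold pvForb1
    split_ifs with h
    · exact nodup_foldl_update _ _ _ h0
    · exact h0
  unfold pvForb
  simp only [List.foldl_cons, List.foldl_nil]
  split_ifs <;>
    first
      | exact PySem.Set.nodup_update _ _ (PySem.Set.nodup_update _ _ h1)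
      | exact PySem.Set.nodup_update _ _ h1
      | exact h1

-- sorting the generated set yields exactly the filtered byte range A effectively walks
lemma sorted_forb_eq (mod1 mod2 reg rm : Int) :
    PySem.List.sorted (pvForb mod1 mod2 reg rm) (fun x => x) false
      = (PySem.List.pyRange 0 255 1).filter (pvCond mod1 mod2 reg rm) := by
  apply PySem.List.sorted_eq_of_perm_of_pairwise_lt
  · rw [List.perm_ext_iff_of_nodup (List.Nodup.filter _ (PySem.List.pairwise_lt_pyRange_one 0 255).nodup) (nodup_forb mod1 mod2 reg rm)]
    intro a
    rw [List.mem_filter, mem_forb_iff, PySem.List.mem_pyRange_one]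
  · exact (PySem.List.pairwise_lt_pyRange_one 0 255).filter _

-- ===== VERDICT (by name: the statement is the Claim_ definition above) =====
theorem calculate_spec : Claim_equal_calculate := by
  intro mod1 mod2 reg rm _
  unfold Spec_calculate calculate calculate_alt
  rw [foldA_filter, sorted_forb_eq]
  congr 1
  apply PySem.List.foldl_congr_mem'
  intro i hi acc
  exact stepA_eq_stepB _ _ _ _ _ (List.of_mem_filter hi) acc
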